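-- pv_equiv track=rewrite | github.com/LiuZhipeng99/AW4C | Script_preprocess.py | extract_code_from_warningLine
-- ===== SOURCE A (Python) =====
-- def extract_code_from_warningLine(source_code: str, warningLineNumber: int) -> str:
--     # The warning only gave a line number. 1) simply use the line number to extract the code, 2) extract codes from ast where line numbers are located, 3) others. like path
--     snippet = []
--     lines = source_code.split('\n')
--     line_numbers = {warningLineNumber}
--     # line_numbers = {warningLineNumber - 1, warningLineNumber, warningLineNumber + 1}
--     for i, line in enumerate(lines, start=1):
--         if i in line_numbers:
--             snippet.append(line)
--     return '\n'.join(snippet)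
-- ===== SOURCE B (Python) =====
-- def extract_code_from_warningLine(source_code: str, warningLineNumber: int) -> str:
--     # Direct 1-based indexing instead of scanning every line.
--     lines = source_code.split('\n')
--     if 1 <= warningLineNumber <= len(lines):
--         return lines[warningLineNumber - 1]
--     return ''
-- ===== Notes on version B (the rewrite author's own statement) =====
-- stated objective: simpler
-- what changed: Replaces the enumerate-and-set-membership scan over all lines with a bounds check and direct 1-based indexing into the split result.
import Mathlib
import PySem

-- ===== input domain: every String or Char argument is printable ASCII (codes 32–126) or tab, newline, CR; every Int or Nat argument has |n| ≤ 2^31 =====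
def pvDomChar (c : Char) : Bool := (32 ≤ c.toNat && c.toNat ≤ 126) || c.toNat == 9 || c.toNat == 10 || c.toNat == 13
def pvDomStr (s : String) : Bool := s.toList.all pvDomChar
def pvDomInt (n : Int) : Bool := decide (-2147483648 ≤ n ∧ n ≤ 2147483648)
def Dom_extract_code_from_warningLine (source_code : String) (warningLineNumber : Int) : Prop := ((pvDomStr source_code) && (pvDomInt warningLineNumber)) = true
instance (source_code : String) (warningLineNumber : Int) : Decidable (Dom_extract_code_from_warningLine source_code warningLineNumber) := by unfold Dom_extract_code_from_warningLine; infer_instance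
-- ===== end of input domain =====

-- ===== PORT A =====
-- B replaces A's enumerate-and-membership scan with a bounds check and direct indexing (objective: simpler).
-- split('\n') on a non-empty separator always succeeds; getD [] is unreachable
def extract_code_from_warningLine (source_code : String) (warningLineNumber : Int) : String :=
  let lines := (PySem.Str.split? source_code "\n").getD []
  let line_numbers : PySem.Set Int := PySem.Set.ofList [warningLineNumber]
  let snippet := (PySem.List.enumerate lines 1).foldl
    (fun snippet p => if p.1 ∈ line_numbers then snippet ++ [p.2] else snippet) ([] : List String)
  PySem.Str.join "\n" snippet

-- ===== PORT B =====
def extract_code_from_warningLine_alt (source_code : String) (warningLineNumber : Int) : String :=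
  let lines := (PySem.Str.split? source_code "\n").getD []
  if 1 ≤ warningLineNumber ∧ warningLineNumber ≤ (lines.length : Int) then
    (PySem.List.pyGet? lines (warningLineNumber - 1)).getD ""
  else ""

-- ===== PRECONDITION & SPEC =====
def Spec_extract_code_from_warningLine (source_code : String) (warningLineNumber : Int) (out : String) : Prop := out = extract_code_from_warningLine_alt source_code warningLineNumber
instance (source_code : String) (warningLineNumber : Int) (out : String) : Decidable (Spec_extract_code_from_warningLine source_code warningLineNumber out) := by unfold Spec_extract_code_from_warningLine; infer_instance

-- ===== CLAIM (what is proved, stated in full; the proofs are below) =====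
def Claim_equal_extract_code_from_warningLine : Prop := ∀ (source_code : String) (warningLineNumber : Int), Dom_extract_code_from_warningLine source_code warningLineNumber → Spec_extract_code_from_warningLine source_code warningLineNumber (extract_code_from_warningLine source_code warningLineNumber)

-- ===== LEMMAS AND PROOFS =====
theorem pv_loop (lines : List String) (s n : Int) (acc : List String) :
    (PySem.List.enumerate lines s).foldl
      (fun snippet p => if p.1 ∈ PySem.Set.ofList [n] then snippet ++ [p.2] else snippet) acc
    = acc ++ (if s ≤ n then ((lines[(n - s).toNat]?).toList) else []) := by
  induction lines generalizing s acc with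
  | nil => simp [PySem.List.enumerate]
  | cons x xs ih =>
    rw [PySem.List.enumerate_cons, List.foldl_cons, ih]
    by_cases hs : s = n
    · subst hs
      have hmem : s ∈ PySem.Set.ofList [s] := by simp [PySem.Set.mem_ofList]
      have h1 : ¬ (s + 1 ≤ s) := by omega
      simp [hmem, h1]
    · have hmem : ¬ (s ∈ PySem.Set.ofList [n]) := by
        simp [PySem.Set.mem_ofList, hs]
      rw [if_neg hmem]
      by_cases hle : s ≤ n
      · have h1 : s + 1 ≤ n := by omega
        have h2 : (n - s).toNat = (n - (s + 1)).toNat + 1 := by omega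
        simp [hle, h1, h2]
      · have h1 : ¬ (s + 1 ≤ n) := by omega
        simp [hle, h1]

theorem pv_join_opt (v : Option String) :
    PySem.Str.join "\n" v.toList = v.getD "" := by
  cases v with
  | none =>
    have h := PySem.Str.toList_join "\n" []
    simp only [List.map_nil, PySem.Chars.join_nil] at h
    exact String.toList_injective (by simpa using h)
  | some s =>
    have h := PySem.Str.toList_join "\n" [s]
    simp only [List.map_cons, List.map_nil, PySem.Chars.join_singleton] at h
    exact String.toList_injective (by simpa using h)

-- ===== VERDICT (by name: the statement is the Claim_ definition above) =====
theorem extract_code_from_warningLine_spec : Claim_equal_extract_code_from_warningLine := by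
  intro source_code n _
  unfold Spec_extract_code_from_warningLine extract_code_from_warningLine extract_code_from_warningLine_alt
  dsimp only
  set lines := (PySem.Str.split? source_code "\n").getD [] with hl
  rw [pv_loop, List.nil_append]
  by_cases h1 : 1 ≤ n
  · rw [if_pos h1]
    by_cases h2 : n ≤ (lines.length : Int)
    · rw [if_pos ⟨h1, h2⟩]
      have he : n - 1 = (((n - 1).toNat : Nat) : Int) := by omega
      rw [he, PySem.List.pyGet?_natCast]
      exact pv_join_opt _
    · rw [if_neg (show ¬(1 ≤ n ∧ n ≤ (lines.length : Int)) by tauto)]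
      have hlen : lines.length ≤ (n - 1).toNat := by omega
      rw [List.getElem?_eq_none hlen]
      simpa using pv_join_opt (none : Option String)
  · rw [if_neg h1, if_neg (show ¬(1 ≤ n ∧ n ≤ (lines.length : Int)) by tauto)]
    simpa using pv_join_opt (none : Option String)
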